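-- pv_equiv track=rewrite | github.com/samuelbalogh/poem-generator | poemer.py | get_last_n_vowels
-- ===== SOURCE A (Python) =====
-- vowels = 'aáeéiíuúüűöőoó'
--
-- def get_last_n_vowels(text, n=2):
--     last_n_vowels = []
--     for char in text[::-1]:
--         if char in vowels:
--             last_n_vowels.append(char)
--             if len(last_n_vowels) == n:
--                 break
--     last_n_vowels.reverse()
--     return last_n_vowels
-- ===== SOURCE B (Python) =====
-- vowels = 'aáeéiíuúüűöőoó'
--
-- def get_last_n_vowels(text, n=2):
--     vowels_list = [c for c in text if c in vowels]
--     return vowels_list[-n:] if n > 0 else vowels_list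
-- ===== Notes on version B (the rewrite author's own statement) =====
-- stated objective: idiomatic
-- what changed: Replaces the reversed-scan loop with break and final reverse by a single forward filter comprehension followed by taking the last-n tail slice (full list when n <= 0, where A never breaks).
import Mathlib
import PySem

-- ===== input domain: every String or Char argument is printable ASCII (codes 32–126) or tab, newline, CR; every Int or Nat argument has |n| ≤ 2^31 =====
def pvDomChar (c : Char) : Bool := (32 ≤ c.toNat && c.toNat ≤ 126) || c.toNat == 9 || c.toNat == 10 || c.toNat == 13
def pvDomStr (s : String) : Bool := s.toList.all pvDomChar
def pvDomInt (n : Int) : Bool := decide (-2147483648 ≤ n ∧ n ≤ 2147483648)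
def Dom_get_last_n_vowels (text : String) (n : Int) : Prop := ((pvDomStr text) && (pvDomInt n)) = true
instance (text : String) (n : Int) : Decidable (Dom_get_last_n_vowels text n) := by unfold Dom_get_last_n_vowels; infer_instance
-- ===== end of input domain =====

-- B replaces A's reversed scan with break-at-n by a forward filter plus a last-n tail slice (idiomatic; same cost).

-- module constant: vowels = 'aáeéiíuúüűöőoó'
def pvVowels : List Char := "aáeéiíuúüűöőoó".toList

-- ===== PORT A =====
-- the for-loop over text[::-1] with append and break: structural recursion over the
-- reversed char list (s[::-1] is reversal: PySem.Str.slice?_none_none_neg_one)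
def pvGoA (n : Int) : List Char → List String → List String
  | [], acc => acc
  | c :: rest, acc =>
    if c ∈ pvVowels then
      let acc' := acc ++ [String.ofList [c]]
      if (acc'.length : Int) = n then acc' else pvGoA n rest acc'
    else pvGoA n rest acc

def get_last_n_vowels (text : String) (n : Int) : List String :=
  (pvGoA n text.toList.reverse []).reverse

-- ===== PORT B =====
def get_last_n_vowels_alt (text : String) (n : Int) : List String :=
  let vowels_list := (text.toList.filter (fun c => c ∈ pvVowels)).map (fun c => String.ofList [c])
  if n > 0 then PySem.List.slice vowels_list (some (-n)) none else vowels_list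

-- ===== PRECONDITION & SPEC =====
def Spec_get_last_n_vowels (text : String) (n : Int) (out : List String) : Prop := out = get_last_n_vowels_alt text n
instance (text : String) (n : Int) (out : List String) : Decidable (Spec_get_last_n_vowels text n out) := by unfold Spec_get_last_n_vowels; infer_instance

-- ===== CLAIM (what is proved, stated in full; the proofs are below) =====
def Claim_equal_get_last_n_vowels : Prop := ∀ (text : String) (n : Int), Dom_get_last_n_vowels text n → Spec_get_last_n_vowels text n (get_last_n_vowels text n)

-- ===== LEMMAS AND PROOFS =====

def pvVs (l : List Char) : List String :=
  (l.filter (fun c => c ∈ pvVowels)).map (fun c => String.ofList [c])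

theorem pvGoA_take (n : Int) (hn : 0 < n) : ∀ (l : List Char) (acc : List String),
    (acc.length : Int) < n → pvGoA n l acc = acc ++ (pvVs l).take (n.toNat - acc.length)
  | [], acc, _ => by simp [pvGoA, pvVs]
  | c :: rest, acc, h => by
    by_cases hv : c ∈ pvVowels
    · have hlen : ((acc ++ [String.ofList [c]]).length : Int) = acc.length + 1 := by simp
      by_cases hb : ((acc ++ [String.ofList [c]]).length : Int) = n
      · have hb2 : (acc.length : Int) + 1 = n := by simpa using hb
        have hk : n.toNat - acc.length = 1 := by omega
        simp [pvGoA, hv, hb2, pvVs, hk]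
      · have hb2 : ¬ ((acc.length : Int) + 1 = n) := by simpa using hb
        have h' : ((acc ++ [String.ofList [c]]).length : Int) < n := by omega
        have ih := pvGoA_take n hn rest (acc ++ [String.ofList [c]]) h'
        have hk : n.toNat - acc.length = (n.toNat - (acc ++ [String.ofList [c]]).length) + 1 := by
          simp at h' ⊢; omega
        simp [pvGoA, hv, hb2, ih, pvVs, hk]
    · have ih := pvGoA_take n hn rest acc h
      simp [pvGoA, hv, ih, pvVs]

theorem pvGoA_all (n : Int) (hn : n ≤ 0) : ∀ (l : List Char) (acc : List String),
    pvGoA n l acc = acc ++ pvVs l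
  | [], acc => by simp [pvGoA, pvVs]
  | c :: rest, acc => by
    by_cases hv : c ∈ pvVowels
    · have hb2 : ¬ ((acc.length : Int) + 1 = n) := by omega
      simp [pvGoA, hv, hb2, pvGoA_all n hn rest, pvVs]
    · simp [pvGoA, hv, pvGoA_all n hn rest, pvVs]

theorem pvVs_reverse (l : List Char) : pvVs l.reverse = (pvVs l).reverse := by
  simp [pvVs]

-- ===== VERDICT (by name: the statement is the Claim_ definition above) =====
theorem get_last_n_vowels_spec : Claim_equal_get_last_n_vowels := by
  intro text n _
  unfold Spec_get_last_n_vowels get_last_n_vowels get_last_n_vowels_alt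
  by_cases hn : 0 < n
  · have hk : 0 < n.toNat := by omega
    rw [pvGoA_take n hn text.toList.reverse [] (by simp; omega)]
    have hneg : (-n) = -((n.toNat : Nat) : Int) := by omega
    rw [if_pos hn, hneg, PySem.List.slice_from_neg_natCast _ _ hk]
    simp only [List.nil_append, pvVs_reverse]
    rw [List.take_reverse, List.reverse_reverse]
    rfl
  · rw [pvGoA_all n (by omega) text.toList.reverse []]
    simp only [List.nil_append, pvVs_reverse, List.reverse_reverse, if_neg hn]
    rfl
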